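-- pv_equiv track=rewrite | github.com/zofialuther/CS8395-08-Paper1-updated | data/translated-code/desc-to-python/haskell/Successive-prime-differences.py | group_primes
-- ===== SOURCE A (Python) =====
-- def group_primes(primes):
--     groups = {}
--     for i in range(len(primes)):
--         for j in range(i+1, len(primes)):
--             diff = primes[j] - primes[i]
--             if diff not in groups:
--                 groups[diff] = [primes[i]]
--             groups[diff].append(primes[j])
--     return groups
-- ===== SOURCE B (Python) =====
-- def group_primes(primes):
--     # Pass 1: index each difference -> ordered list of (lower, upper) pairs.
--     index = {}
--     for k, a in enumerate(primes):
--         for b in primes[k + 1:]: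
--             index.setdefault(b - a, []).append((a, b))
--     # Pass 2: materialise each group: the first pair contributes both primes,
--     # every pair contributes its upper prime.
--     result = {}
--     for d, pairs in index.items():
--         result[d] = [pairs[0][0]] + [b for _, b in pairs]
--     return result
-- ===== Notes on version B (the rewrite author's own statement) =====
-- stated objective: alternative
-- what changed: B decomposes the work into two passes: it first builds an index from each difference to the ordered list of (lower, upper) pairs producing it, then materialises every output group from that index in one sweep, instead of A's single loop that creates and grows the output lists in place.
import Mathlib
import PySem

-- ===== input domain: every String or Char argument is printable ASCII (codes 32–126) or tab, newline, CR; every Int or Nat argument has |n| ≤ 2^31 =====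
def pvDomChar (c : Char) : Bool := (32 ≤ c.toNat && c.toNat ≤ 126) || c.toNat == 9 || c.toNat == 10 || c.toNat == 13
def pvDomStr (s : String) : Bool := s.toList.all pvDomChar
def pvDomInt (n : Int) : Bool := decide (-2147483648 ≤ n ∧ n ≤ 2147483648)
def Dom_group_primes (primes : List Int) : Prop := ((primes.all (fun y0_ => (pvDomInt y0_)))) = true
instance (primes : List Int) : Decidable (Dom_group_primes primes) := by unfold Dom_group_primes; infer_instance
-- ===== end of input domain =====

-- B rebuilds the same grouping in two passes (difference -> pair index, then materialisation); alternative decomposition, same cost.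


-- ===== PORT A =====
-- body of A's inner loop: one pair (a = primes[i], b = primes[j])
def gpStepA (groups : PySem.Dict Int (List Int)) (a b : Int) : PySem.Dict Int (List Int) :=
  let diff := b - a
  let groups := if groups.contains diff = false then groups.insert diff [a] else groups
  groups.modify diff [] (fun l => l ++ [b])

def group_primes (primes : List Int) : List (Int × List Int) :=
  ((PySem.List.pyRange 0 (primes.length : Int) 1).foldl (fun groups i =>
    (PySem.List.pyRange (i + 1) (primes.length : Int) 1).foldl (fun groups j =>
      gpStepA groups (PySem.List.pyGetD primes i 0) (PySem.List.pyGetD primes j 0)) groups)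
    PySem.Dict.empty).items

-- ===== PORT B =====
-- body of B's pass-1 inner loop: index.setdefault(b - a, []).append((a, b))
def gpStepB (idx : PySem.Dict Int (List (Int × Int))) (a b : Int) : PySem.Dict Int (List (Int × Int)) :=
  idx.modify (b - a) [] (fun l => l ++ [(a, b)])

def group_primes_alt (primes : List Int) : List (Int × List Int) :=
  let index : PySem.Dict Int (List (Int × Int)) :=
    (PySem.List.enumerate primes).foldl (fun idx ka =>
      (PySem.List.slice primes (some (ka.1 + 1)) none).foldl (fun idx b =>
        gpStepB idx ka.2 b) idx)
      PySem.Dict.empty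
  (index.items.foldl (fun res dp =>
      res.insert dp.1 ((PySem.List.pyGetD dp.2 0 (0, 0)).1 :: dp.2.map (fun p => p.2)))
    PySem.Dict.empty).items

-- ===== PRECONDITION & SPEC =====
def Spec_group_primes (primes : List Int) (out : List (Int × List Int)) : Prop := out = group_primes_alt primes
instance (primes : List Int) (out : List (Int × List Int)) : Decidable (Spec_group_primes primes out) := by unfold Spec_group_primes; infer_instance

-- ===== CLAIM (what is proved, stated in full; the proofs are below) =====
def Claim_equal_group_primes : Prop := ∀ (primes : List Int), Dom_group_primes primes → Spec_group_primes primes (group_primes primes)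

-- ===== LEMMAS AND PROOFS =====
-- all ordered pairs (earlier, later) of a list
def gpPairs : List Int → List (Int × Int)
  | [] => []
  | x :: xs => xs.map (fun b => (x, b)) ++ gpPairs xs

def gpMatP (dp : Int × List (Int × Int)) : Int × List Int :=
  (dp.1, (PySem.List.pyGetD dp.2 0 (0, 0)).1 :: dp.2.map (fun p => p.2))

def gpMat (e : PySem.Dict Int (List (Int × Int))) : PySem.Dict Int (List Int) :=
  PySem.Dict.mk (e.items.map gpMatP)

theorem gpMat_items (e : PySem.Dict Int (List (Int × Int))) : (gpMat e).items = e.items.map gpMatP := rfl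

theorem gpMat_keys (e : PySem.Dict Int (List (Int × Int))) : (gpMat e).keys = e.keys := by
  simp [PySem.Dict.keys, gpMat, List.map_map, gpMatP]

theorem gpMat_contains (e : PySem.Dict Int (List (Int × Int))) (k : Int) :
    (gpMat e).contains k = e.contains k := by
  simp only [PySem.Dict.contains, gpMat, List.any_map]
  rfl

theorem gpStep_commute (e : PySem.Dict Int (List (Int × Int))) (a b : Int)
    (hnd : e.keys.Nodup) (hne : ∀ v ∈ e.values, v ≠ []) :
    gpStepA (gpMat e) a b = gpMat (gpStepB e a b) := by
  apply PySem.Dict.ext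
  by_cases h : e.contains (b - a) = true
  · -- key already present
    have hsome : (e.get? (b - a)).isSome := by
      rw [← PySem.Dict.contains_eq_isSome_get?]; exact h
    obtain ⟨v, hv⟩ := Option.isSome_iff_exists.mp hsome
    have hmem : (b - a, v) ∈ e.items := PySem.Dict.mem_items_of_get?_eq_some e hv
    have hvne : v ≠ [] := hne v (List.mem_map.mpr ⟨(b - a, v), hmem, rfl⟩)
    have hgetD : e.getD (b - a) [] = v := PySem.Dict.getD_of_get?_eq_some e [] hv
    have hmatmem : (b - a, gpMatP (b - a, v) |>.2) ∈ (gpMat e).items := by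
      rw [gpMat_items]; exact List.mem_map.mpr ⟨(b - a, v), hmem, rfl⟩
    have hmatnd : (gpMat e).keys.Nodup := by rw [gpMat_keys]; exact hnd
    have hmatgetD : (gpMat e).getD (b - a) [] = (gpMatP (b - a, v)).2 :=
      PySem.Dict.getD_of_mem_items _ hmatmem hmatnd []
    have hmatc : (gpMat e).contains (b - a) = true := by rw [gpMat_contains]; exact h
    simp only [gpStepA, gpStepB, PySem.Dict.modify, hmatc, hgetD]
    rw [if_neg (by simp)]
    rw [gpMat_items (PySem.Dict.insert e (b - a) (v ++ [(a, b)]))]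
    rw [PySem.Dict.items_insert_of_contains _ _ hmatc,
        PySem.Dict.items_insert_of_contains _ _ h, gpMat_items,
        hmatgetD, List.map_map, List.map_map]
    apply List.map_congr_left
    intro p hp
    by_cases hpk : p.1 = b - a
    · have hpv : p = (b - a, v) := by
        have h1 : e.get? p.1 = some p.2 := PySem.Dict.get?_of_mem_items e (by exact hp) hnd
        rw [hpk, hv] at h1
        cases p; simp_all
      subst hpv
      obtain ⟨v0, vs, rfl⟩ := List.exists_cons_of_ne_nil hvne
      simp [gpMatP, PySem.List.pyGetD_zero]
    · simp [Function.comp, gpMatP, hpk]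
  · -- new key
    have h' : e.contains (b - a) = false := by simpa using h
    have hmatc : (gpMat e).contains (b - a) = false := by rw [gpMat_contains]; exact h'
    have hgetD : e.getD (b - a) [] = [] := PySem.Dict.getD_of_not_contains e [] h'
    have hall : ∀ p ∈ (gpMat e).items, (p.1 == b - a) = false := by
      have hc := hmatc
      simp only [PySem.Dict.contains, List.any_eq_false] at hc
      intro p hp; simpa using hc p hp
    simp only [gpStepA, gpStepB, PySem.Dict.modify, hmatc, hgetD, reduceIte]
    rw [PySem.Dict.items_insert_of_contains _ _ (PySem.Dict.contains_insert_self _ _ _),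
        PySem.Dict.items_insert_of_not_contains _ _ hmatc,
        PySem.Dict.getD_insert_self,
        gpMat_items (PySem.Dict.insert e (b - a) ([] ++ [(a, b)])),
        PySem.Dict.items_insert_of_not_contains _ _ h',
        List.map_append, List.map_append, gpMat_items]
    congr 1
    · trans List.map id (List.map gpMatP e.items)
      · exact List.map_congr_left (fun p hp => by
          simp [hall p (by rw [gpMat_items] at *; exact hp)])
      · simp
    · simp [gpMatP]

theorem gpStepB_nodup (e : PySem.Dict Int (List (Int × Int))) (a b : Int)
    (h : e.keys.Nodup) : (gpStepB e a b).keys.Nodup := by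
  simp only [gpStepB, PySem.Dict.modify]
  exact PySem.Dict.nodup_keys_insert _ _ _ h

theorem gpStepB_values (e : PySem.Dict Int (List (Int × Int))) (a b : Int)
    (h : ∀ v ∈ e.values, v ≠ []) : ∀ v ∈ (gpStepB e a b).values, v ≠ [] := by
  intro v hv
  simp only [gpStepB, PySem.Dict.modify] at hv
  rcases PySem.Dict.mem_values_insert _ _ _ _ hv with h1 | h1
  · subst h1; simp
  · exact h v h1

theorem gpFold_commute (ps : List (Int × Int)) :
    ∀ (e : PySem.Dict Int (List (Int × Int))), e.keys.Nodup → (∀ v ∈ e.values, v ≠ []) →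
    ps.foldl (fun g p => gpStepA g p.1 p.2) (gpMat e)
      = gpMat (ps.foldl (fun i p => gpStepB i p.1 p.2) e) := by
  induction ps with
  | nil => intro e _ _; rfl
  | cons p ps ih =>
    intro e h1 h2
    simp only [List.foldl_cons]
    rw [gpStep_commute e p.1 p.2 h1 h2]
    exact ih _ (gpStepB_nodup e p.1 p.2 h1) (gpStepB_values e p.1 p.2 h2)

theorem gpFoldB_nodup (ps : List (Int × Int)) :
    ∀ (e : PySem.Dict Int (List (Int × Int))), e.keys.Nodup →
    (ps.foldl (fun i p => gpStepB i p.1 p.2) e).keys.Nodup := by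
  induction ps with
  | nil => intro e h; exact h
  | cons p ps ih => intro e h; exact ih _ (gpStepB_nodup e p.1 p.2 h)

theorem gpA_loop (primes : List Int) : ∀ (l pre : List Int) (g : PySem.Dict Int (List Int)),
    primes = pre ++ l →
    (PySem.List.pyRange (pre.length : Int) (primes.length : Int) 1).foldl (fun g i =>
      (PySem.List.pyRange (i + 1) (primes.length : Int) 1).foldl (fun g j =>
        gpStepA g (PySem.List.pyGetD primes i 0) (PySem.List.pyGetD primes j 0)) g) g
    = (gpPairs l).foldl (fun g p => gpStepA g p.1 p.2) g := by
  intro l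
  induction l with
  | nil =>
    intro pre g hpre
    rw [PySem.List.pyRange_one_eq_nil (by subst hpre; simp)]
    rfl
  | cons x xs ih =>
    intro pre g hpre
    have hlen : (pre.length : Int) < (primes.length : Int) := by
      subst hpre; simp only [List.length_append, List.length_cons]; push_cast; omega
    rw [PySem.List.pyRange_one_cons hlen, List.foldl_cons]
    have hget : PySem.List.pyGetD primes ((pre.length : Nat) : Int) 0 = x := by
      subst hpre
      simp [List.getD_eq_getElem?_getD]
    have hdrop : primes.drop (pre.length + 1) = xs := by
      subst hpre
      rw [show pre.length + 1 = (pre ++ [x]).length by simp,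
          show pre ++ x :: xs = (pre ++ [x]) ++ xs by simp, List.drop_left]
    have hinner :
        (PySem.List.pyRange ((pre.length : Int) + 1) (primes.length : Int) 1).foldl
          (fun g j => gpStepA g (PySem.List.pyGetD primes ((pre.length : Nat) : Int) 0)
            (PySem.List.pyGetD primes j 0)) g
        = xs.foldl (fun g b => gpStepA g x b) g := by
      simp only [hget]
      rw [PySem.List.foldl_pyRange_pyGetD' primes 0 (fun g b => gpStepA g x b) g
            (by positivity)]
      have ht : ((pre.length : Int) + 1).toNat = pre.length + 1 := by omega
      rw [ht, hdrop]
    rw [hinner]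
    have hlen2 : (pre.length : Int) + 1 = (((pre ++ [x]).length : Nat) : Int) := by
      push_cast [List.length_append]; simp
    rw [hlen2, ih (pre ++ [x]) _ (by simp [hpre])]
    simp only [gpPairs, List.foldl_append, List.foldl_map]

theorem gpB_loop (primes : List Int) : ∀ (l pre : List Int) (idx : PySem.Dict Int (List (Int × Int))),
    primes = pre ++ l →
    (PySem.List.enumerate l (pre.length : Int)).foldl (fun idx ka =>
      (PySem.List.slice primes (some (ka.1 + 1)) none).foldl (fun idx b =>
        gpStepB idx ka.2 b) idx) idx
    = (gpPairs l).foldl (fun i p => gpStepB i p.1 p.2) idx := by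
  intro l
  induction l with
  | nil => intro pre idx hpre; rfl
  | cons x xs ih =>
    intro pre idx hpre
    rw [PySem.List.enumerate_cons, List.foldl_cons]
    have hdrop : primes.drop (pre.length + 1) = xs := by
      subst hpre
      rw [show pre.length + 1 = (pre ++ [x]).length by simp,
          show pre ++ x :: xs = (pre ++ [x]) ++ xs by simp, List.drop_left]
    have hslice : PySem.List.slice primes (some ((pre.length : Int) + 1)) none = xs := by
      rw [show (pre.length : Int) + 1 = ((pre.length + 1 : Nat) : Int) by push_cast; ring,
          PySem.List.slice_from_natCast, hdrop]
    rw [hslice]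
    have hlen2 : (pre.length : Int) + 1 = (((pre ++ [x]).length : Nat) : Int) := by
      push_cast [List.length_append]; simp
    rw [hlen2, ih (pre ++ [x]) _ (by simp [hpre])]
    simp only [gpPairs, List.foldl_append, List.foldl_map]

theorem gp_main (primes : List Int) : group_primes primes = group_primes_alt primes := by
  have h1 := gpA_loop primes primes [] PySem.Dict.empty (by simp)
  have h2 := gpB_loop primes primes [] PySem.Dict.empty (by simp)
  simp only [List.length_nil, Nat.cast_zero] at h1 h2
  have hcomm : (gpPairs primes).foldl (fun g p => gpStepA g p.1 p.2) PySem.Dict.empty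
      = gpMat ((gpPairs primes).foldl (fun i p => gpStepB i p.1 p.2) PySem.Dict.empty) :=
    gpFold_commute (gpPairs primes) PySem.Dict.empty
      (by simp [PySem.Dict.keys_empty])
      (by simp [PySem.Dict.values, PySem.Dict.empty])
  have hnd : ((gpPairs primes).foldl (fun i p => gpStepB i p.1 p.2) PySem.Dict.empty).keys.Nodup :=
    gpFoldB_nodup (gpPairs primes) PySem.Dict.empty (by simp [PySem.Dict.keys_empty])
  unfold group_primes group_primes_alt
  dsimp only
  rw [h1, h2, hcomm]
  have hnd' : (((gpPairs primes).foldl (fun i p => gpStepB i p.1 p.2) PySem.Dict.empty).items.map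
      (fun dp : Int × List (Int × Int) => dp.1)).Nodup := hnd
  rw [PySem.Dict.items_foldl_insert_fresh
        ((gpPairs primes).foldl (fun i p => gpStepB i p.1 p.2) PySem.Dict.empty).items
        (fun dp => dp.1)
        (fun dp => (PySem.List.pyGetD dp.2 0 (0, 0)).1 :: dp.2.map (fun p => p.2))
        PySem.Dict.empty (fun a _ => PySem.Dict.contains_empty _) hnd']
  rfl

-- ===== VERDICT (by name: the statement is the Claim_ definition above) =====
theorem group_primes_spec : Claim_equal_group_primes := by
  intro primes _
  unfold Spec_group_primes
  exact gp_main primes
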